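-- pv_equiv track=rewrite | github.com/droid-bg/Outlook-MCP-Server | src/utils/email_formatter.py | get_mailbox_distribution
-- ===== SOURCE A (Python) =====
-- from typing import List, Dict, Any
--
-- def get_mailbox_distribution(emails: List[Dict[str, Any]]) -> Dict[str, int]:
--     """Get distribution of emails across mailboxes."""
--     distribution = {"personal": 0, "shared": 0, "unknown": 0}
--
--     for email in emails:
--         mailbox_type = email.get('mailbox_type', 'unknown')
--         if mailbox_type in distribution:
--             distribution[mailbox_type] += 1
--         else:
--             distribution['unknown'] += 1
--
--     return distribution
-- ===== SOURCE B (Python) =====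
-- from typing import List, Dict, Any
--
-- def get_mailbox_distribution(emails: List[Dict[str, Any]]) -> Dict[str, int]:
--     """Get distribution of emails across mailboxes (divide and conquer)."""
--     n = len(emails)
--     if n == 0:
--         return {"personal": 0, "shared": 0, "unknown": 0}
--     if n == 1:
--         t = emails[0].get('mailbox_type', 'unknown')
--         k = t if t in ("personal", "shared") else "unknown"
--         d = {"personal": 0, "shared": 0, "unknown": 0}
--         d[k] = 1
--         return d
--     mid = n // 2
--     left = get_mailbox_distribution(emails[:mid])
--     right = get_mailbox_distribution(emails[mid:])
--     return {k: left[k] + right[k] for k in ("personal", "shared", "unknown")}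
-- ===== Notes on version B (the rewrite author's own statement) =====
-- stated objective: alternative
-- what changed: Replaces A's single linear pass mutating a three-bucket dict with a divide-and-conquer recursion: the list is split in half, the two halves' distributions are computed recursively and merged by summing the three buckets, with singleton lists classified directly.
import Mathlib
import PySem

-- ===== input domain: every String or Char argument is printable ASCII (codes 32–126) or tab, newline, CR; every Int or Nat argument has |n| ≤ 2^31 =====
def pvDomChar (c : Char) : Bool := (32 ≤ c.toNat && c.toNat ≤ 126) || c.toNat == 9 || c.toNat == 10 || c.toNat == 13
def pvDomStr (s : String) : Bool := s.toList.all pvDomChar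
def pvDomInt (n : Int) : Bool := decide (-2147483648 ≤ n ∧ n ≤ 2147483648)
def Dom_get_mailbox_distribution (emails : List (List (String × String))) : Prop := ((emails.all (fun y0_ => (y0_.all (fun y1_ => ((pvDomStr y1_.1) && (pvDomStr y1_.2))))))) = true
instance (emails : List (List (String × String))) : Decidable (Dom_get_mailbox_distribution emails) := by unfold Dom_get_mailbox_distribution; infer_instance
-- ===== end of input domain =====

-- B replaces A's single linear pass over a mutable three-bucket dict with a
-- divide-and-conquer recursion (split in half, recurse, merge by summing buckets);
-- objective: alternative.

-- ===== PORT A =====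
def get_mailbox_distribution (emails : List (List (String × String))) : List (String × Int) :=
  let init : PySem.Dict String Int := PySem.Dict.ofList [("personal", 0), ("shared", 0), ("unknown", 0)]
  let dist := emails.foldl (fun distribution email =>
      let mailbox_type := (PySem.Dict.mk email).getD "mailbox_type" "unknown"
      if distribution.contains mailbox_type then
        distribution.modify mailbox_type 0 (· + 1)
      else
        distribution.modify "unknown" 0 (· + 1)) init
  dist.items

-- ===== PORT B =====
-- emails[0] is ported via pyGetD (index 0 is in range: the branch has length = 1);
-- n // 2 on the nonnegative n = len(emails) is Nat division; left[k] is ported via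
-- Dict.getD k 0 (the key is always present in the recursive results).
def get_mailbox_distribution_alt (emails : List (List (String × String))) : List (String × Int) :=
  if _h0 : emails.length = 0 then [("personal", 0), ("shared", 0), ("unknown", 0)]
  else if _h1 : emails.length = 1 then
    let t := (PySem.Dict.mk (PySem.List.pyGetD emails 0 [])).getD "mailbox_type" "unknown"
    let k := if t = "personal" ∨ t = "shared" then t else "unknown"
    ((PySem.Dict.mk [("personal", (0:Int)), ("shared", 0), ("unknown", 0)]).insert k 1).items
  else
    let mid := emails.length / 2
    let left := PySem.Dict.mk (get_mailbox_distribution_alt (emails.take mid))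
    let right := PySem.Dict.mk (get_mailbox_distribution_alt (emails.drop mid))
    [("personal", left.getD "personal" 0 + right.getD "personal" 0),
     ("shared", left.getD "shared" 0 + right.getD "shared" 0),
     ("unknown", left.getD "unknown" 0 + right.getD "unknown" 0)]
termination_by emails.length
decreasing_by
  · simp [List.length_take]; omega
  · simp [List.length_drop]; omega

-- ===== PRECONDITION & SPEC =====
def Spec_get_mailbox_distribution (emails : List (List (String × String))) (out : List (String × Int)) : Prop := out = get_mailbox_distribution_alt emails
instance (emails : List (List (String × String))) (out : List (String × Int)) : Decidable (Spec_get_mailbox_distribution emails out) := by unfold Spec_get_mailbox_distribution; infer_instance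

-- ===== CLAIM (what is proved, stated in full; the proofs are below) =====
def Claim_equal_get_mailbox_distribution : Prop := ∀ (emails : List (List (String × String))), Dom_get_mailbox_distribution emails → Spec_get_mailbox_distribution emails (get_mailbox_distribution emails)

-- ===== LEMMAS AND PROOFS =====

-- the mailbox type of one email record
def pvType (email : List (String × String)) : String :=
  (PySem.Dict.mk email).getD "mailbox_type" "unknown"

-- the canonical three-bucket distribution both programs compute
def pvCanon (es : List (List (String × String))) : List (String × Int) :=
  let types := es.map pvType
  [("personal", (types.count "personal" : Int)), ("shared", (types.count "shared" : Int)),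
   ("unknown", (es.length : Int) - types.count "personal" - types.count "shared")]

-- lookups in a canonical three-bucket dict
lemma getD3_personal (a b c : Int) :
    (PySem.Dict.mk [("personal",a),("shared",b),("unknown",c)]).getD "personal" 0 = a := rfl
lemma getD3_shared (a b c : Int) :
    (PySem.Dict.mk [("personal",a),("shared",b),("unknown",c)]).getD "shared" 0 = b := rfl
lemma getD3_unknown (a b c : Int) :
    (PySem.Dict.mk [("personal",a),("shared",b),("unknown",c)]).getD "unknown" 0 = c := rfl

-- One step of A's loop on the canonical three-bucket dict bumps exactly one bucket.
lemma step_eq (a b c : Int) (t : String) :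
    (if (PySem.Dict.mk [("personal",a),("shared",b),("unknown",c)]).contains t = true
       then (PySem.Dict.mk [("personal",a),("shared",b),("unknown",c)]).modify t 0 (· + 1)
       else (PySem.Dict.mk [("personal",a),("shared",b),("unknown",c)]).modify "unknown" 0 (· + 1))
    = PySem.Dict.mk [("personal", a + if t = "personal" then 1 else 0),
                     ("shared",  b + if t = "shared" then 1 else 0),
                     ("unknown", c + if t ≠ "personal" ∧ t ≠ "shared" then 1 else 0)] := by
  by_cases hp : t = "personal"
  · subst hp
    simp [PySem.Dict.contains, PySem.Dict.modify, PySem.Dict.insert, PySem.Dict.getD,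
      PySem.Dict.get?]
  · by_cases hs : t = "shared"
    · subst hs
      simp [PySem.Dict.contains, PySem.Dict.modify, PySem.Dict.insert, PySem.Dict.getD,
        PySem.Dict.get?]
    · by_cases hu : t = "unknown"
      · subst hu
        simp [PySem.Dict.contains, PySem.Dict.modify, PySem.Dict.insert, PySem.Dict.getD,
          PySem.Dict.get?, hp, hs]
      · simp [PySem.Dict.contains, PySem.Dict.modify, PySem.Dict.insert, PySem.Dict.getD,
          PySem.Dict.get?, hp, hs, Ne.symm hp, Ne.symm hs, Ne.symm hu]

-- A's loop invariant: the dict always holds the three buckets, with values the per-type counts.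
lemma loop_inv (es : List (List (String × String))) (a b c : Int) :
    es.foldl (fun distribution email =>
        let mailbox_type := (PySem.Dict.mk email).getD "mailbox_type" "unknown"
        if distribution.contains mailbox_type then
          distribution.modify mailbox_type 0 (· + 1)
        else
          distribution.modify "unknown" 0 (· + 1))
      (PySem.Dict.mk [("personal", a), ("shared", b), ("unknown", c)])
    = (let types := es.map pvType
       PySem.Dict.mk [("personal", a + types.count "personal"), ("shared", b + types.count "shared"),
         ("unknown", c + ((es.length : Int) - types.count "personal" - types.count "shared"))]) := by
  induction es generalizing a b c with
  | nil => simp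
  | cons e es ih =>
    rw [List.foldl_cons]
    show List.foldl _ (if (PySem.Dict.mk [("personal",a),("shared",b),("unknown",c)]).contains
        ((PySem.Dict.mk e).getD "mailbox_type" "unknown") = true then _ else _) es = _
    rw [step_eq, ih]
    simp only [List.map_cons, List.count_cons, List.length_cons, pvType]
    by_cases hp : (PySem.Dict.mk e).getD "mailbox_type" "unknown" = "personal" <;>
      by_cases hs : (PySem.Dict.mk e).getD "mailbox_type" "unknown" = "shared" <;>
      simp_all <;> omega

lemma a_eq_canon (es : List (List (String × String))) :
    get_mailbox_distribution es = pvCanon es := by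
  show (List.foldl _ (PySem.Dict.ofList [("personal", 0), ("shared", 0), ("unknown", 0)]) es).items = _
  have h0 : PySem.Dict.ofList [("personal", (0:Int)), ("shared", 0), ("unknown", 0)]
      = PySem.Dict.mk [("personal", 0), ("shared", 0), ("unknown", 0)] := by decide
  rw [h0, loop_inv]
  simp [pvCanon]

lemma b_eq_canon (es : List (List (String × String))) :
    get_mailbox_distribution_alt es = pvCanon es := by
  have key : ∀ (n : Nat) (es : List (List (String × String))), es.length ≤ n →
      get_mailbox_distribution_alt es = pvCanon es := by
    intro n
    induction n with
    | zero =>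
      intro es h
      have : es = [] := by simpa using List.length_eq_zero_iff.mp (Nat.le_zero.mp h)
      subst this
      rw [get_mailbox_distribution_alt.eq_def]
      decide
    | succ n ih =>
      intro es h
      rw [get_mailbox_distribution_alt.eq_def]
      split_ifs with h0 h1
      · have : es = [] := List.length_eq_zero_iff.mp h0
        subst this; decide
      · obtain ⟨e, he⟩ := List.length_eq_one_iff.mp h1
        subst he
        have hg : PySem.List.pyGetD [e] (0 : Int) ([] : List (String × String)) = e := rfl
        rw [hg]
        by_cases hp : (PySem.Dict.mk e).getD "mailbox_type" "unknown" = "personal"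
        · simp [pvCanon, pvType, hp, PySem.Dict.insert]
        · by_cases hs : (PySem.Dict.mk e).getD "mailbox_type" "unknown" = "shared"
          · simp [pvCanon, pvType, hs, PySem.Dict.insert]
          · simp [pvCanon, pvType, hp, hs, PySem.Dict.insert]
      · simp only []
        rw [ih (es.take (es.length / 2)) (by simp [List.length_take]; omega),
            ih (es.drop (es.length / 2)) (by simp [List.length_drop]; omega)]
        have hsplit : (es.take (es.length / 2)).map pvType ++ (es.drop (es.length / 2)).map pvType
            = es.map pvType := by rw [← List.map_append, List.take_append_drop]
        have hcp : ((es.take (es.length / 2)).map pvType).count "personal"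
            + ((es.drop (es.length / 2)).map pvType).count "personal"
            = (es.map pvType).count "personal" := by rw [← List.count_append, hsplit]
        have hcs : ((es.take (es.length / 2)).map pvType).count "shared"
            + ((es.drop (es.length / 2)).map pvType).count "shared"
            = (es.map pvType).count "shared" := by rw [← List.count_append, hsplit]
        have hlen : (es.take (es.length / 2)).length + (es.drop (es.length / 2)).length
            = es.length := by simp; omega
        simp only [pvCanon, getD3_personal, getD3_shared, getD3_unknown,
          List.cons.injEq, Prod.mk.injEq, and_true, true_and]
        refine ⟨?_, ?_, ?_⟩ <;> omega
  exact key es.length es le_rfl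

-- ===== VERDICT (by name: the statement is the Claim_ definition above) =====
theorem get_mailbox_distribution_spec : Claim_equal_get_mailbox_distribution := by
  intro emails _
  unfold Spec_get_mailbox_distribution
  rw [a_eq_canon, b_eq_canon]
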